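-- pv_equiv track=rewrite | github.com/elomir21/snake_game | snake_game/snake.py | wall_limit
-- ===== SOURCE A (Python) =====
-- def wall_limit(snake_posit):
--     """This method generate the wall limit
--     :param snake_posit: position of snake
--     :type snake_posit: tuple
--     :return: wall collision or not
--     :rtype: int
--     """
--     if snake_posit > (590, -1):
--         return 1
--     if snake_posit > (590, 590):
--         return 1
--     if snake_posit < (0, -1):
--         return 1
--     if snake_posit < (0, 590):
--         return 1
--
--     for x_posit in range(0, 590):
--         if snake_posit == (x_posit, 590):
--             return 1
--         if snake_posit == (x_posit, 30):
--             return 1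
--     return 0
-- ===== SOURCE B (Python) =====
-- def wall_limit(snake_posit):
--     """Direct boundary check instead of scanning 590 x positions."""
--     if snake_posit > (590, -1) or snake_posit < (0, 590):
--         return 1
--     if len(snake_posit) == 2 and snake_posit[1] in (30, 590) and 0 <= snake_posit[0] < 590:
--         return 1
--     return 0
-- ===== Notes on version B (the rewrite author's own statement) =====
-- stated objective: simpler
-- what changed: The 590-iteration scan comparing the tuple against every (x, 590) and (x, 30) is replaced by a direct length/range/membership check, and the four lexicographic comparisons collapse to the two non-redundant ones.
import Mathlib
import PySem

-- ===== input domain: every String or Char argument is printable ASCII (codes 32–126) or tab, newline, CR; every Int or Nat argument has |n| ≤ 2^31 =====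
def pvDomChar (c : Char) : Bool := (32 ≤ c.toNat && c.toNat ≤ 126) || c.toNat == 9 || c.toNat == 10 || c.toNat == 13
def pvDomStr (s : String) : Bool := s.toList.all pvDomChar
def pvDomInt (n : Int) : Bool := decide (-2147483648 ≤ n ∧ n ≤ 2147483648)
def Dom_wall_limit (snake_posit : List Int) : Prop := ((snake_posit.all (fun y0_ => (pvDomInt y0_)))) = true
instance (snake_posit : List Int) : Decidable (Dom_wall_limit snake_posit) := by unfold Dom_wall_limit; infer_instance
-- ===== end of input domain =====

-- B replaces A's 590-step scan by a direct range/membership check (simpler; return-value equivalence).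

-- Python tuple lexicographic '<' on int tuples (shorter strict prefix is smaller); exact.
def tupLt : List Int → List Int → Bool
  | [], [] => false
  | [], _ :: _ => true
  | _ :: _, [] => false
  | a :: as, b :: bs => decide (a < b) || (decide (a = b) && tupLt as bs)

-- ===== PORT A =====
-- the 'for x_posit in range(0, 590)' loop with its two equality tests and early returns
def wallLoopA (t : List Int) : List Int → Int
  | [] => 0
  | x :: rest =>
      if t = [x, 590] then 1
      else if t = [x, 30] then 1
      else wallLoopA t rest

def wall_limit (snake_posit : List Int) : Int :=
  if tupLt [590, -1] snake_posit then 1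
  else if tupLt [590, 590] snake_posit then 1
  else if tupLt snake_posit [0, -1] then 1
  else if tupLt snake_posit [0, 590] then 1
  else wallLoopA snake_posit (PySem.List.pyRange 0 590 1)

-- ===== PORT B =====
def wall_limit_alt (snake_posit : List Int) : Int :=
  if tupLt [590, -1] snake_posit || tupLt snake_posit [0, 590] then 1
  else
    match snake_posit with
    | [a, b] => if (b = 30 ∨ b = 590) ∧ 0 ≤ a ∧ a < 590 then 1 else 0
    | _ => 0

-- ===== PRECONDITION & SPEC =====
def Spec_wall_limit (snake_posit : List Int) (out : Int) : Prop := out = wall_limit_alt snake_posit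
instance (snake_posit : List Int) (out : Int) : Decidable (Spec_wall_limit snake_posit out) := by unfold Spec_wall_limit; infer_instance

-- ===== CLAIM (what is proved, stated in full; the proofs are below) =====
def Claim_equal_wall_limit : Prop := ∀ (snake_posit : List Int), Dom_wall_limit snake_posit → Spec_wall_limit snake_posit (wall_limit snake_posit)

-- ===== LEMMAS AND PROOFS =====

theorem wallLoopA_eq (t l : List Int) :
    wallLoopA t l = if ∃ x ∈ l, t = [x, 590] ∨ t = [x, 30] then 1 else 0 := by
  induction l with
  | nil => simp [wallLoopA]
  | cons x rest ih =>
      simp only [wallLoopA, ih, List.mem_cons]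
      by_cases h1 : t = [x, 590]
      · simp [h1]
      · by_cases h2 : t = [x, 30]
        · simp [h2]
        · simp only [if_neg h1, if_neg h2]
          congr 1
          simp only [eq_iff_iff]
          constructor
          · rintro ⟨y, hy, h⟩; exact ⟨y, List.mem_cons_of_mem _ hy, h⟩
          · rintro ⟨y, hy, h⟩
            rcases List.mem_cons.mp hy with rfl | hy'
            · rcases h with h | h
              · exact absurd h h1
              · exact absurd h h2
            · exact ⟨y, hy', h⟩

theorem wall_limit_spec : Claim_equal_wall_limit := by
  unfold Claim_equal_wall_limit
  intro t _
  unfold Spec_wall_limit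
  match t with
  | [] => simp [wall_limit, wall_limit_alt, tupLt]
  | [a] =>
      simp only [wall_limit, wall_limit_alt, tupLt, wallLoopA_eq, Bool.or_eq_true, Bool.and_eq_true,
        Bool.false_eq_true, decide_eq_true_eq]
      have hx : ¬ ∃ x ∈ PySem.List.pyRange 0 590 1, [a] = [x, 590] ∨ [a] = [x, 30] := by
        rintro ⟨x, _, h | h⟩ <;> simp at h
      simp only [if_neg hx]
      split_ifs <;> first | rfl | (simp only [and_true, and_false, or_false] at *; omega)
  | [a, b] =>
      simp only [wall_limit, wall_limit_alt, tupLt, wallLoopA_eq, Bool.or_eq_true, Bool.and_eq_true,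
        Bool.false_eq_true, decide_eq_true_eq]
      have hx : (∃ x ∈ PySem.List.pyRange 0 590 1, [a, b] = [x, 590] ∨ [a, b] = [x, 30]) ↔
          ((b = 30 ∨ b = 590) ∧ 0 ≤ a ∧ a < 590) := by
        constructor
        · rintro ⟨x, hx, h | h⟩ <;>
            · simp only [List.cons.injEq, and_true] at h
              obtain ⟨rfl, rfl⟩ := h
              rw [PySem.List.mem_pyRange_one] at hx
              constructor
              · simp
              · omega
        · rintro ⟨hb, ha0, ha1⟩
          refine ⟨a, by rw [PySem.List.mem_pyRange_one]; omega, ?_⟩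
          rcases hb with rfl | rfl
          · right; rfl
          · left; rfl
      rw [if_congr hx rfl rfl]
      split_ifs <;> first | rfl | (simp only [and_true, and_false, or_false] at *; omega)
  | a :: b :: c :: r =>
      simp only [wall_limit, wall_limit_alt, tupLt, wallLoopA_eq, Bool.or_eq_true, Bool.and_eq_true,
        Bool.false_eq_true, decide_eq_true_eq]
      have hx : ¬ ∃ x ∈ PySem.List.pyRange 0 590 1, a :: b :: c :: r = [x, 590] ∨ a :: b :: c :: r = [x, 30] := by
        rintro ⟨x, _, h | h⟩ <;> simp at h
      simp only [if_neg hx]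
      split_ifs <;> first | rfl | (simp only [and_true, and_false, or_false] at *; omega)

-- ===== VERDICT (by name: the statement is the Claim_ definition above) =====
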